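-- pv_equiv track=rewrite | github.com/rossjjennings/crypto | frieder_luk.py | to_fl
-- ===== SOURCE A (Python) =====
-- def to_fl(n):
--     '''
--     Calculate the (ternary) Frieder-Luk encoding of a positive integer `n`.
--     This consists of a pair of integers: one whose set bits correspond to
--     the ones in the ternary expansion of `n`, and another whose set bits
--     correspond to the twos.
--     '''
--     digits = []
--     while n != 0:
--         digits.append(n % 3)
--         n //= 3
--
--     ones = 0
--     twos = 0
--     for digit in digits[::-1]:
--         ones = 2*ones + (digit == 1)
--         twos = 2*twos + (digit == 2)
--
--     return ones, twos
-- ===== SOURCE B (Python) =====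
-- def to_fl(n):
--     ones = 0
--     twos = 0
--     k = 0
--     while n != 0:
--         d = n % 3
--         if d == 1:
--             ones += 2 ** k
--         elif d == 2:
--             twos += 2 ** k
--         k += 1
--         n //= 3
--     return ones, twos
-- ===== Notes on version B (the rewrite author's own statement) =====
-- stated objective: simpler
-- what changed: Single LSB-first loop that adds the bit 2**k directly per ternary digit, replacing A's intermediate digit list, reversal and MSB-first Horner doubling pass.
import Mathlib
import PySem

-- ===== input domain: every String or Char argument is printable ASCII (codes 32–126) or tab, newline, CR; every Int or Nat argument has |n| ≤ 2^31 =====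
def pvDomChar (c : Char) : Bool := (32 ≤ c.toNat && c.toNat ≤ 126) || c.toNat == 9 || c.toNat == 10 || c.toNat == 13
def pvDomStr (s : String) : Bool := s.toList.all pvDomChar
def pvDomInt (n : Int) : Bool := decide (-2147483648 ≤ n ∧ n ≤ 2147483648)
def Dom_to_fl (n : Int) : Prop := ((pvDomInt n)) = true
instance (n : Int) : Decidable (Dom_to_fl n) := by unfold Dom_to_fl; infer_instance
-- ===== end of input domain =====

-- B replaces A's digit list + reversal + MSB-first Horner doubling by one LSB-first loop
-- that adds 2^k per ternary digit ('simpler'); equal returns proved for all n ≥ 0.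

-- ===== PORT A =====
-- while n != 0: digits.append(n % 3); n //= 3   (guard written n ≤ 0 for totality;
-- identical to n = 0 on n ≥ 0, the only inputs Pre_ admits — Python loops forever on n < 0)
def to_fl_digits (n : Int) : List Int :=
  if h : n ≤ 0 then [] else
    PySem.Int.mod n 3 :: to_fl_digits (PySem.Int.floordiv n 3)
termination_by n.toNat
decreasing_by
  simp only [PySem.Int.floordiv_eq_ediv_of_pos (by omega : (0:Int) < 3)]
  omega

def to_fl (n : Int) : Int × Int :=
  let digits := to_fl_digits n
  -- for digit in digits[::-1]: ones = 2*ones + (digit == 1); twos = 2*twos + (digit == 2)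
  ((PySem.List.slice? digits none none (-1)).getD []).foldl
    (fun (p : Int × Int) d =>
      (2 * p.1 + (if d = 1 then 1 else 0), 2 * p.2 + (if d = 2 then 1 else 0)))
    (0, 0)

-- ===== PORT B =====
-- while n != 0: d = n % 3; add 2**k to ones/twos; k += 1; n //= 3
-- (guard written n ≤ 0 for totality; identical to n = 0 on the admitted inputs n ≥ 0)
def to_fl_alt_loop (n ones twos : Int) (k : Nat) : Int × Int :=
  if h : n ≤ 0 then (ones, twos) else
    let d := PySem.Int.mod n 3
    let ones' := if d = 1 then ones + 2 ^ k else ones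
    let twos' := if d = 1 then twos else if d = 2 then twos + 2 ^ k else twos
    to_fl_alt_loop (PySem.Int.floordiv n 3) ones' twos' (k + 1)
termination_by n.toNat
decreasing_by
  simp only [PySem.Int.floordiv_eq_ediv_of_pos (by omega : (0:Int) < 3)]
  omega

def to_fl_alt (n : Int) : Int × Int := to_fl_alt_loop n 0 0 0

-- ===== PRECONDITION & SPEC =====
-- Pre_ excludes n < 0, on which Python A (and B) loop forever: n //= 3 never reaches 0 from -1.
def Pre_to_fl (n : Int) : Prop := 0 ≤ n
instance (n : Int) : Decidable (Pre_to_fl n) := by unfold Pre_to_fl; infer_instance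
def pvWitness_to_fl : Int := 100

def Spec_to_fl (n : Int) (out : Int × Int) : Prop := out = to_fl_alt n
instance (n : Int) (out : Int × Int) : Decidable (Spec_to_fl n out) := by unfold Spec_to_fl; infer_instance

-- ===== CLAIM (what is proved, stated in full; the proofs are below) =====
def Claim_equal_to_fl : Prop := ∀ (n : Int), Dom_to_fl n → Pre_to_fl n → Spec_to_fl n (to_fl n)

-- ===== LEMMAS AND PROOFS =====

-- A's Horner pass over the reversed digit list, as a function of the digit list.
def flHorner (ds : List Int) : Int × Int :=
  ds.reverse.foldl
    (fun (p : Int × Int) d =>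
      (2 * p.1 + (if d = 1 then 1 else 0), 2 * p.2 + (if d = 2 then 1 else 0)))
    (0, 0)

theorem flHorner_cons (d : Int) (ds : List Int) :
    flHorner (d :: ds) =
      (2 * (flHorner ds).1 + (if d = 1 then 1 else 0),
       2 * (flHorner ds).2 + (if d = 2 then 1 else 0)) := by
  simp [flHorner]

theorem to_fl_eq_horner (n : Int) : to_fl n = flHorner (to_fl_digits n) := by
  simp [to_fl, flHorner, PySem.List.slice?_none_none_neg_one]

theorem to_fl_alt_loop_eq (m : Nat) : ∀ (n : Int), n.toNat = m → 0 ≤ n →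
    ∀ (ones twos : Int) (k : Nat),
      to_fl_alt_loop n ones twos k =
        (ones + 2 ^ k * (flHorner (to_fl_digits n)).1,
         twos + 2 ^ k * (flHorner (to_fl_digits n)).2) := by
  induction m using Nat.strong_induction_on with
  | _ m ih =>
    intro n hm hn ones twos k
    by_cases h : n ≤ 0
    · have : n = 0 := le_antisymm h hn
      subst this
      rw [to_fl_alt_loop, to_fl_digits]
      simp [flHorner]
    · have hpos : 0 < n := lt_of_not_ge h
      have hdiv : PySem.Int.floordiv n 3 = n / 3 :=
        PySem.Int.floordiv_eq_ediv_of_pos (by omega)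
      have hmod : PySem.Int.mod n 3 = n % 3 :=
        PySem.Int.mod_eq_emod_of_pos (by omega)
      have hlt : (n / 3).toNat < m := by omega
      have hnn : 0 ≤ n / 3 := by omega
      rw [to_fl_alt_loop, to_fl_digits]
      simp only [h, dif_neg, not_false_iff]
      rw [hdiv, hmod, ih _ hlt (n / 3) rfl hnn, flHorner_cons]
      have hm3 : n % 3 = 0 ∨ n % 3 = 1 ∨ n % 3 = 2 := by omega
      rcases hm3 with h3 | h3 | h3 <;> simp [h3] <;> constructor <;> ring

-- ===== VERDICT (by name: the statement is the Claim_ definition above) =====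
theorem to_fl_spec : Claim_equal_to_fl := by
  intro n _ hn
  unfold Spec_to_fl to_fl_alt
  rw [to_fl_alt_loop_eq n.toNat n rfl hn 0 0 0, to_fl_eq_horner]
  simp
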